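-- pv_equiv track=rewrite | github.com/yangtianshuo/Zanzibar | Zanzibar.py | roll_type1
-- ===== SOURCE A (Python) =====
-- def roll_type1(roll):
--     points = 0
--     for i in range(len(roll)):
--         if roll[i] == 1:
--             points += 100
--         elif roll[i] == 6:
--             points += 60
--         elif roll[i] == 2:
--             points += 2
--         elif roll[i] == 3:
--             points += 3
--         elif roll[i] == 4:
--             points += 4
--         else:
--             points += 5
--     return points
-- ===== SOURCE B (Python) =====
-- def roll_type1(roll):
--     c1 = roll.count(1)
--     c6 = roll.count(6)
--     c2 = roll.count(2)
--     c3 = roll.count(3)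
--     c4 = roll.count(4)
--     return (100 * c1 + 60 * c6 + 2 * c2 + 3 * c3 + 4 * c4
--             + 5 * (len(roll) - c1 - c6 - c2 - c3 - c4))
-- ===== Notes on version B (the rewrite author's own statement) =====
-- stated objective: simpler
-- what changed: Replaces the per-die branching loop with five count() passes and one closed-form arithmetic expression; the else-bucket is len(roll) minus the five named counts.
import Mathlib
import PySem

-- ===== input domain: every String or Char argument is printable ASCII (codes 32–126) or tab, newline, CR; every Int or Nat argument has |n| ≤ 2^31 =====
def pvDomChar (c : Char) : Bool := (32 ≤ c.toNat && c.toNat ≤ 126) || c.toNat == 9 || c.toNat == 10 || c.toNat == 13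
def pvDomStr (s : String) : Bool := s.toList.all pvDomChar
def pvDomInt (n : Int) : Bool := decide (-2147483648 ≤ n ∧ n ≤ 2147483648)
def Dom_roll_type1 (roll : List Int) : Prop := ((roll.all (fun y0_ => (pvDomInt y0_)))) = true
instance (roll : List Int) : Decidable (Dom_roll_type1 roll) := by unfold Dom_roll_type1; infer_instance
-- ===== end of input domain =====

-- ===== PORT A =====
-- B: counts each scoring face once and returns a single closed-form expression instead of a per-die branching loop (simpler).
-- literal port of A: loop over range(len(roll)), branch on roll[i]
def roll_type1 (roll : List Int) : Int :=
  (PySem.List.pyRange 0 roll.length 1).foldl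
    (fun points i =>
      let x := PySem.List.pyGetD roll i 0
      if x == 1 then points + 100
      else if x == 6 then points + 60
      else if x == 2 then points + 2
      else if x == 3 then points + 3
      else if x == 4 then points + 4
      else points + 5) 0

-- ===== PORT B =====
-- port of B: five counts, one closed-form expression
def roll_type1_alt (roll : List Int) : Int :=
  let c1 : Int := PySem.List.count roll 1
  let c6 : Int := PySem.List.count roll 6
  let c2 : Int := PySem.List.count roll 2
  let c3 : Int := PySem.List.count roll 3
  let c4 : Int := PySem.List.count roll 4
  100 * c1 + 60 * c6 + 2 * c2 + 3 * c3 + 4 * c4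
    + 5 * ((roll.length : Int) - c1 - c6 - c2 - c3 - c4)

-- ===== PRECONDITION & SPEC =====
def Spec_roll_type1 (roll : List Int) (out : Int) : Prop := out = roll_type1_alt roll
instance (roll : List Int) (out : Int) : Decidable (Spec_roll_type1 roll out) := by unfold Spec_roll_type1; infer_instance

-- ===== CLAIM (what is proved, stated in full; the proofs are below) =====
def Claim_equal_roll_type1 : Prop := ∀ (roll : List Int), Dom_roll_type1 roll → Spec_roll_type1 roll (roll_type1 roll)

-- ===== LEMMAS AND PROOFS =====

-- ===== VERDICT (by name: the statement is the Claim_ definition above) =====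
theorem foldl_body (roll : List Int) (init : Int) :
    roll.foldl
      (fun points x =>
        if x == 1 then points + 100
        else if x == 6 then points + 60
        else if x == 2 then points + 2
        else if x == 3 then points + 3
        else if x == 4 then points + 4
        else points + 5) init
    = init + roll_type1_alt roll := by
  induction roll generalizing init with
  | nil => simp [roll_type1_alt, PySem.List.count]
  | cons h t ih =>
    simp only [List.foldl_cons, ih, roll_type1_alt, PySem.List.count, List.count_cons]
    by_cases h1 : h = 1 <;> by_cases h6 : h = 6 <;> by_cases h2 : h = 2 <;>
      by_cases h3 : h = 3 <;> by_cases h4 : h = 4 <;>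
      simp_all <;> ring

theorem roll_type1_spec : Claim_equal_roll_type1 := by
  intro roll _
  unfold Spec_roll_type1 roll_type1
  rw [PySem.List.foldl_pyRange_zero_pyGetD' roll 0
    (fun points x =>
      if x == 1 then points + 100
      else if x == 6 then points + 60
      else if x == 2 then points + 2
      else if x == 3 then points + 3
      else if x == 4 then points + 4
      else points + 5) 0]
  simpa using foldl_body roll 0
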